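-- pv_equiv track=rewrite | github.com/angelicalam/BMI203-HW1-FAST-AQ-Parser | seqparser/seq.py | transcribe
-- ===== SOURCE A (Python) =====
-- TRANSCRIPTION_MAPPING = {"A": "U", "C": "G", "T": "A", "G": "C"}
--
-- ALLOWED_NUC = TRANSCRIPTION_MAPPING.keys()
--
-- def transcribe(seq: str, reverse: bool = False) -> str:
--     """
--     Write a function that will transcribe (replace DNA sequence to RNA
--     by replacing all 'T' to 'U') in an input sequence
--     """
--     if (seq == "") or (seq is None):
--         raise ValueError(f"No sequence was given")
--     final_seq = []
--     for nucleotide in seq: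
--         if nucleotide not in ALLOWED_NUC:
--             raise ValueError(f"{seq} is not a valid sequence.")
--         # Get transcribed nucleotide
--         final_seq.append(TRANSCRIPTION_MAPPING[nucleotide])
--     final_seq = ''.join(final_seq)
--     return final_seq
-- ===== SOURCE B (Python) =====
-- TRANSCRIPTION_MAPPING = {"A": "U", "C": "G", "T": "A", "G": "C"}
--
-- ALLOWED_NUC = TRANSCRIPTION_MAPPING.keys()
--
-- def transcribe(seq: str, reverse: bool = False) -> str:
--     if (seq == "") or (seq is None):
--         raise ValueError(f"No sequence was given")
--     # valid iff every position is counted by exactly one of the four nucleotide counts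
--     if seq.count("A") + seq.count("C") + seq.count("G") + seq.count("T") != len(seq):
--         raise ValueError(f"{seq} is not a valid sequence.")
--     # staged whole-string substitutions; 'g' is a temporary symbol for the C/G swap
--     return (seq.replace("A", "U")
--                .replace("T", "A")
--                .replace("C", "g")
--                .replace("G", "C")
--                .replace("g", "G"))
-- ===== Notes on version B (the rewrite author's own statement) =====
-- stated objective: alternative
-- what changed: Replaced the per-character validate-and-append loop and dict lookups with arithmetic validation (the four nucleotide counts must sum to the length) and transcription by five staged whole-string replace substitutions using a temporary symbol for the C/G swap.
import Mathlib
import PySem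

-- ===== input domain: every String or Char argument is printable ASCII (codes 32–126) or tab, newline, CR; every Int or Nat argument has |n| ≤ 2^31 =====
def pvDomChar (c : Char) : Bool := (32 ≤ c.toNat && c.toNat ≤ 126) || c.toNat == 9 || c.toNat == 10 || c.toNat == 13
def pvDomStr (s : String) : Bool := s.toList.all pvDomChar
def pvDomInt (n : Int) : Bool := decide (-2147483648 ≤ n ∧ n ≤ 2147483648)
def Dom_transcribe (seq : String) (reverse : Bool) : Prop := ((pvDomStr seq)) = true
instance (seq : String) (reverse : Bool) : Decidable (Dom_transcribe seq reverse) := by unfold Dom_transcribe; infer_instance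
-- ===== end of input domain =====

-- B replaces A's per-character validate-and-append loop with arithmetic validation
-- (the four nucleotide counts must sum to the length) and five staged whole-string
-- substitutions; return values are identical on Pre_.

-- ===== PORT A =====
-- TRANSCRIPTION_MAPPING[c] as a list of chars (Python's values are 1-char strings);
-- [] stands for the KeyError branch, unreachable inside Pre_ (Python raises there).
def tMapA (c : Char) : List Char :=
  if c = 'A' then ['U'] else if c = 'C' then ['G'] else
  if c = 'T' then ['A'] else if c = 'G' then ['C'] else []

-- Python raises ValueError on seq == "" and on any nucleotide outside ALLOWED_NUC;
-- those inputs are outside Pre_ and the port returns "" there.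
def transcribe (seq : String) (reverse : Bool) : String :=
  if seq = "" then ""
  else String.ofList (PySem.Chars.join [] (seq.toList.foldl (fun acc c => acc ++ [tMapA c]) []))

-- ===== PORT B =====
-- Source B: count-sum validation, then five staged str.replace passes ('g' a temp symbol).
-- The two raise branches are outside Pre_; the port returns "" there.
def transcribe_alt (seq : String) (reverse : Bool) : String :=
  if seq = "" then ""
  else if PySem.Str.count seq "A" + PySem.Str.count seq "C" + PySem.Str.count seq "G"
          + PySem.Str.count seq "T" = seq.toList.length then
    PySem.Str.replace (PySem.Str.replace (PySem.Str.replace (PySem.Str.replace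
      (PySem.Str.replace seq "A" "U") "T" "A") "C" "g") "G" "C") "g" "G"
  else ""

-- ===== PRECONDITION & SPEC =====
-- Pre_ excludes exactly the inputs on which A raises ValueError: the empty string
-- (empty-sequence error) and strings with a character outside {A,C,T,G}.
def Pre_transcribe (seq : String) (reverse : Bool) : Prop :=
  seq ≠ "" ∧ seq.toList.all (fun c => (['A', 'C', 'T', 'G'] : List Char).contains c) = true
instance (seq : String) (reverse : Bool) : Decidable (Pre_transcribe seq reverse) := by
  unfold Pre_transcribe; infer_instance

def pvWitness_transcribe : String × Bool := ("ACGT", false)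

def Spec_transcribe (seq : String) (reverse : Bool) (out : String) : Prop := out = transcribe_alt seq reverse
instance (seq : String) (reverse : Bool) (out : String) : Decidable (Spec_transcribe seq reverse out) := by unfold Spec_transcribe; infer_instance

-- ===== CLAIM (what is proved, stated in full; the proofs are below) =====
def Claim_equal_transcribe : Prop := ∀ (seq : String) (reverse : Bool), Dom_transcribe seq reverse → Pre_transcribe seq reverse → Spec_transcribe seq reverse (transcribe seq reverse)

-- ===== LEMMAS AND PROOFS =====

-- B's mapping, as the composition of the five single-char substitutions realises it.
def tCharB (c : Char) : Char :=
  if c = 'A' then 'U' else if c = 'C' then 'G' else if c = 'T' then 'A' else 'C'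

def subst1 (a b c : Char) : Char := if c = a then b else c

-- Chars.count with a single-char needle is List.count.
theorem countgo_single (a : Char) (l : List Char) (acc : Nat) :
    PySem.Chars.count.go [a] l.length l acc = acc + l.count a := by
  induction l generalizing acc with
  | nil => simp [PySem.Chars.count.go]
  | cons c t ih =>
    by_cases h : a = c
    · subst h
      simp [PySem.Chars.count.go, List.isPrefixOf, ih]
      omega
    · simp [PySem.Chars.count.go, List.isPrefixOf, h, ih, Ne.symm h]

theorem count_single (a : Char) (l : List Char) :
    PySem.Chars.count l [a] = l.count a := by
  simpa [PySem.Chars.count] using countgo_single a l 0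

-- Chars.replace with a single-char needle is a pointwise map.
theorem replgo_single (a b : Char) (l acc : List Char) :
    PySem.Chars.replace.go [a] [b] l.length l acc
      = acc.reverse ++ l.map (subst1 a b) := by
  induction l generalizing acc with
  | nil => simp [PySem.Chars.replace.go]
  | cons c t ih =>
    by_cases h : a = c
    · subst h
      simp [PySem.Chars.replace.go, List.isPrefixOf, ih, subst1]
    · simp [PySem.Chars.replace.go, List.isPrefixOf, h, ih, subst1, Ne.symm h]

theorem replace_single (a b : Char) (l : List Char) :
    PySem.Chars.replace l [a] [b] = l.map (subst1 a b) := by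
  simpa [PySem.Chars.replace] using replgo_single a b l []

-- Under validity, the four counts sum to the length.
theorem counts_sum (l : List Char)
    (h : ∀ c ∈ l, c ∈ (['A', 'C', 'T', 'G'] : List Char)) :
    l.count 'A' + l.count 'C' + l.count 'G' + l.count 'T' = l.length := by
  induction l with
  | nil => simp
  | cons c t ih =>
    have hc := h c List.mem_cons_self
    have ht := ih fun d hd => h d (List.mem_cons_of_mem _ hd)
    fin_cases hc <;> simp <;> omega

-- The five-stage substitution agrees with tCharB on valid nucleotides.
theorem subst_chain_eq (c : Char) (h : c ∈ (['A', 'C', 'T', 'G'] : List Char)) :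
    subst1 'g' 'G' (subst1 'G' 'C' (subst1 'C' 'g' (subst1 'T' 'A' (subst1 'A' 'U' c))))
      = tCharB c := by
  fin_cases h <;> decide

-- On a valid nucleotide, A's mapping is the singleton of B's mapped char.
theorem tMapA_eq_singleton (c : Char) (h : c ∈ (['A', 'C', 'T', 'G'] : List Char)) :
    tMapA c = [tCharB c] := by
  fin_cases h <;> decide

theorem map_tMapA_eq (l : List Char) (h : ∀ c ∈ l, c ∈ (['A', 'C', 'T', 'G'] : List Char)) :
    l.map tMapA = (l.map tCharB).map ([·]) := by
  induction l with
  | nil => rfl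
  | cons c t ih =>
    simp only [List.map_cons, List.cons.injEq]
    exact ⟨tMapA_eq_singleton c (h c List.mem_cons_self),
           ih fun d hd => h d (List.mem_cons_of_mem _ hd)⟩

-- ===== VERDICT (by name: the statement is the Claim_ definition above) =====
set_option maxHeartbeats 1000000 in
theorem transcribe_spec : Claim_equal_transcribe := by
  intro seq reverse _ hpre
  obtain ⟨hne, hall'⟩ := hpre
  have hall : ∀ c ∈ seq.toList, c ∈ (['A', 'C', 'T', 'G'] : List Char) := by
    simpa using hall'
  unfold Spec_transcribe transcribe transcribe_alt
  rw [if_neg hne, if_neg hne]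
  have hcnt : PySem.Str.count seq "A" + PySem.Str.count seq "C" + PySem.Str.count seq "G"
      + PySem.Str.count seq "T" = seq.toList.length := by
    have hA := count_single 'A' seq.toList
    have hC := count_single 'C' seq.toList
    have hG := count_single 'G' seq.toList
    have hT := count_single 'T' seq.toList
    simp only [PySem.Str.count_eq] at *
    have := counts_sum seq.toList hall
    simp only [show ("A" : String).toList = ['A'] from rfl,
               show ("C" : String).toList = ['C'] from rfl,
               show ("G" : String).toList = ['G'] from rfl,
               show ("T" : String).toList = ['T'] from rfl] at *
    omega
  rw [if_pos hcnt]
  rw [← String.toList_inj]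
  -- A's side: the foldl-append loop is a map, joined back to the mapped chars
  -- B's side: each replace is a pointwise map; compose and compare pointwise
  simp only [PySem.Str.toList_replace, String.toList_ofList,
             show ("A" : String).toList = ['A'] from rfl,
             show ("U" : String).toList = ['U'] from rfl,
             show ("T" : String).toList = ['T'] from rfl,
             show ("C" : String).toList = ['C'] from rfl,
             show ("g" : String).toList = ['g'] from rfl,
             show ("G" : String).toList = ['G'] from rfl,
             replace_single, List.map_map]
  rw [PySem.List.foldl_append_singleton_eq_map, List.nil_append,
      map_tMapA_eq seq.toList hall, PySem.Chars.join_nil_singletons]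
  symm
  exact List.map_congr_left fun c hc => subst_chain_eq c (hall c hc)
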